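-- pv_equiv track=rewrite | github.com/harshitpathak12/Smart_mobility_ai | smart_mobility/ml_backend/inference/fusion/event_fusion.py | _get_max_severity
-- ===== SOURCE A (Python) =====
-- from typing import Dict, List, Optional, Tuple
--
-- def _get_max_severity(severities: List[str]) -> str:
--     """Get maximum severity from list"""
--     severity_order = ["low", "medium", "high", "critical"]
--     severity_values = {s: i for i, s in enumerate(severity_order)}
--
--     max_sev = "low"
--     max_val = -1
--
--     for severity in severities:
--         val = severity_values.get(severity.lower(), -1)
--         if val > max_val:
--             max_val = val
--             max_sev = severity
--
--     return max_sev
-- ===== SOURCE B (Python) =====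
-- def _get_max_severity(severities):
--     """Get maximum severity from list"""
--     severity_order = ["low", "medium", "high", "critical"]
--     lowered = [s.lower() for s in severities]
--     for name in reversed(severity_order):
--         if name in lowered:
--             return severities[lowered.index(name)]
--     return "low"
-- ===== Notes on version B (the rewrite author's own statement) =====
-- stated objective: alternative
-- what changed: Instead of a single left fold tracking a running (max_sev, max_val) pair over the input, B scans severity levels from critical down and returns the first element of the list whose lowercased form matches the highest level present (falling back to 'low').
import Mathlib
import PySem

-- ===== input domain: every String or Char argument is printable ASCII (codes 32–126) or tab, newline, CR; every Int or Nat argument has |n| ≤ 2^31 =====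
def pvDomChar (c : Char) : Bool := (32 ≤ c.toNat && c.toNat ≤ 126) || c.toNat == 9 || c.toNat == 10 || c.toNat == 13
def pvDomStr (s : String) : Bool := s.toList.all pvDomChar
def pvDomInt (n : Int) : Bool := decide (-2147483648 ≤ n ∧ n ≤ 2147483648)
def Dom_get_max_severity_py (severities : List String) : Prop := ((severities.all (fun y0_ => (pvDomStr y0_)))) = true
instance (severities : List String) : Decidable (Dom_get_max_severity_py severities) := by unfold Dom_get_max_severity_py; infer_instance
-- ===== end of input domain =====

-- B replaces A's single left fold over the input (tracking a running (max_sev, max_val) pair)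
-- by a scan of the severity levels from critical downward, returning the first input element
-- whose lowercased form matches the highest level present; objective: alternative decomposition.

-- ===== PORT A =====
def get_max_severity_py (severities : List String) : String :=
  let severity_order : List String := ["low", "medium", "high", "critical"]
  let severity_values : PySem.Dict String Int :=
    (PySem.List.enumerate severity_order 0).foldl
      (fun d p => d.insert p.2 p.1) PySem.Dict.empty
  (severities.foldl
    (fun (st : String × Int) severity =>
      let val := severity_values.getD (PySem.Str.lower severity) (-1)
      if st.2 < val then (severity, val) else st)
    ("low", -1)).1

-- ===== PORT B =====
-- 'if name in lowered: return severities[lowered.index(name)]' is ported as one index? lookup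
-- (membership test and index fused; exact: index? is some iff the Python 'in' succeeds).
def pvPickB (severities lowered : List String) : List String → String
  | [] => "low"
  | name :: rest =>
    match PySem.List.index? lowered name with
    | some i => PySem.List.pyGetD severities (i : Int) "low"
    | none => pvPickB severities lowered rest

def get_max_severity_py_alt (severities : List String) : String :=
  let lowered := severities.map (fun s => PySem.Str.lower s)
  pvPickB severities lowered ["critical", "high", "medium", "low"]

-- ===== PRECONDITION & SPEC =====
def Spec_get_max_severity_py (severities : List String) (out : String) : Prop := out = get_max_severity_py_alt severities
instance (severities : List String) (out : String) : Decidable (Spec_get_max_severity_py severities out) := by unfold Spec_get_max_severity_py; infer_instance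

-- ===== CLAIM (what is proved, stated in full; the proofs are below) =====
def Claim_equal_get_max_severity_py : Prop := ∀ (severities : List String), Dom_get_max_severity_py severities → Spec_get_max_severity_py severities (get_max_severity_py severities)

-- ===== LEMMAS AND PROOFS =====

-- rank of a severity string: -1 for unknown
def pvRk (s : String) : Int :=
  if PySem.Str.lower s = "low" then 0
  else if PySem.Str.lower s = "medium" then 1
  else if PySem.Str.lower s = "high" then 2
  else if PySem.Str.lower s = "critical" then 3
  else -1

-- running maximum of ranks
def pvM (mv : Int) (xs : List String) : Int := xs.foldl (fun a x => max a (pvRk x)) mv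

theorem pvRk_le_three (s : String) : pvRk s ≤ 3 := by
  unfold pvRk; split_ifs <;> omega

theorem pvVal_eq (s : String) :
    (((PySem.List.enumerate (["low", "medium", "high", "critical"] : List String) 0).foldl
      (fun d p => d.insert p.2 p.1) PySem.Dict.empty).getD (PySem.Str.lower s) (-1)) = pvRk s := by
  unfold pvRk
  generalize PySem.Str.lower s = l
  show (((((PySem.Dict.empty.insert "low" (0 : Int)).insert "medium" 1).insert "high" 2).insert
      "critical" 3).getD l (-1)) = _
  simp only [PySem.Dict.getD_insert, PySem.Dict.getD_empty]
  split_ifs <;> simp_all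

theorem pvM_cons (mv : Int) (x : String) (xs : List String) :
    pvM mv (x :: xs) = pvM (max mv (pvRk x)) xs := rfl

theorem pvM_ge_init (xs : List String) : ∀ mv, mv ≤ pvM mv xs := by
  induction xs with
  | nil => intro mv; simp [pvM]
  | cons x t ih =>
    intro mv
    have := ih (max mv (pvRk x))
    rw [pvM_cons]; omega

theorem pvM_ge_mem (xs : List String) : ∀ mv x, x ∈ xs → pvRk x ≤ pvM mv xs := by
  induction xs with
  | nil => intro _ _ h; simp at h
  | cons y t ih =>
    intro mv x h
    rw [pvM_cons]
    rcases List.mem_cons.mp h with h | h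
    · subst h; have := pvM_ge_init t (max mv (pvRk x)); omega
    · exact ih _ x h

theorem pvM_exists (xs : List String) : ∀ mv, mv < pvM mv xs → ∃ x ∈ xs, pvRk x = pvM mv xs := by
  induction xs with
  | nil => intro mv h; simp [pvM] at h
  | cons y t ih =>
    intro mv h
    rw [pvM_cons] at h ⊢
    by_cases hy : max mv (pvRk y) < pvM (max mv (pvRk y)) t
    · obtain ⟨x, hx, hrx⟩ := ih _ hy
      exact ⟨x, List.mem_cons_of_mem _ hx, hrx⟩
    · have hle := pvM_ge_init t (max mv (pvRk y))
      have heq : pvM (max mv (pvRk y)) t = max mv (pvRk y) := by omega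
      refine ⟨y, List.mem_cons_self, ?_⟩
      omega

theorem pvFind?_ext {α : Type} (l : List α) (p q : α → Bool)
    (h : ∀ x ∈ l, p x = q x) : l.find? p = l.find? q := by
  induction l with
  | nil => rfl
  | cons x t ih =>
    have hx := h x (List.mem_cons_self)
    simp only [List.find?_cons]
    rw [hx]
    cases q x
    · exact ih (fun y hy => h y (List.mem_cons_of_mem _ hy))
    · rfl

-- characterization of A's fold
theorem pvFoldA_char (xs : List String) : ∀ (ms : String) (mv : Int),
    xs.foldl (fun (st : String × Int) x => if st.2 < pvRk x then (x, pvRk x) else st) (ms, mv)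
      = match xs.find? (fun x => decide (mv < pvRk x ∧ pvM mv xs ≤ pvRk x)) with
        | some y => (y, pvM mv xs)
        | none => (ms, mv) := by
  induction xs with
  | nil => intro ms mv; simp [pvM]
  | cons x t ih =>
    intro ms mv
    rw [List.foldl_cons, pvM_cons]
    by_cases hx : mv < pvRk x
    · have hmax : max mv (pvRk x) = pvRk x := by omega
      rw [if_pos hx, hmax, ih x (pvRk x)]
      have hinit := pvM_ge_init t (pvRk x)
      by_cases hM : pvM (pvRk x) t ≤ pvRk x
      · have heq : pvM (pvRk x) t = pvRk x := by omega
        have hnone : t.find? (fun y => decide (pvRk x < pvRk y ∧ pvM (pvRk x) t ≤ pvRk y)) = none := by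
          apply List.find?_eq_none.mpr
          intro y hy
          have := pvM_ge_mem t (pvRk x) y hy
          simp only [decide_eq_true_eq]
          omega
        rw [hnone, List.find?_cons_of_pos
          (p := fun y => decide (mv < pvRk y ∧ pvM (pvRk x) t ≤ pvRk y))
          (by simp only [decide_eq_true_eq]; omega)]
        simp [heq]
      · push Not at hM
        have hrw : t.find? (fun y => decide (pvRk x < pvRk y ∧ pvM (pvRk x) t ≤ pvRk y))
            = t.find? (fun y => decide (mv < pvRk y ∧ pvM (pvRk x) t ≤ pvRk y)) := by
          apply pvFind?_ext
          intro y _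
          simp only [decide_eq_decide]
          omega
        rw [hrw, List.find?_cons_of_neg
          (p := fun y => decide (mv < pvRk y ∧ pvM (pvRk x) t ≤ pvRk y))
          (by simp only [decide_eq_true_eq]; omega)]
        obtain ⟨y, hy, hry⟩ := pvM_exists t (pvRk x) hM
        cases hf : t.find? (fun y => decide (mv < pvRk y ∧ pvM (pvRk x) t ≤ pvRk y)) with
        | none =>
          exfalso
          have := List.find?_eq_none.mp hf y hy
          simp only [decide_eq_true_eq] at this
          exact this ⟨by omega, by omega⟩
        | some z => rfl
    · have hmax : max mv (pvRk x) = mv := by omega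
      rw [if_neg hx, hmax, ih ms mv]
      rw [List.find?_cons_of_neg
        (p := fun y => decide (mv < pvRk y ∧ pvM mv t ≤ pvRk y))
        (by simp only [decide_eq_true_eq]; omega)]

-- B: index? into the mapped list, then pyGetD, equals find? on the original list
theorem pvIndexMap (f : String → String) (dflt : String) (xs : List String) (a : String) :
    (match PySem.List.index? (xs.map f) a with
     | some i => some (xs.getD i dflt)
     | none => none) = xs.find? (fun x => f x == a) := by
  induction xs with
  | nil => simp [PySem.List.index?]
  | cons x t ih =>
    by_cases h : f x = a
    · subst h
      rw [List.map_cons, PySem.List.index?_cons_self]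
      simp
    · rw [List.map_cons, PySem.List.index?_cons_of_ne _ h]
      have hne : (f x == a) = false := by simp [h]
      simp only [List.find?_cons, hne]
      rw [← ih]
      cases hidx : PySem.List.index? (t.map f) a <;> simp

theorem pvPickB_cons (s : List String) (f : String → String) (n : String) (rest : List String) :
    pvPickB s (s.map f) (n :: rest)
      = match s.find? (fun x => f x == n) with
        | some y => y
        | none => pvPickB s (s.map f) rest := by
  have h := pvIndexMap f "low" s n
  cases hidx : PySem.List.index? (s.map f) n with
  | none =>
    rw [hidx] at h
    simp only at h
    simp only [pvPickB, hidx, ← h]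
  | some i =>
    rw [hidx] at h
    simp only at h
    simp only [pvPickB, hidx, ← h]
    simp [PySem.List.pyGetD_natCast]

theorem pvM_le_three (xs : List String) : ∀ mv, mv ≤ 3 → pvM mv xs ≤ 3 := by
  induction xs with
  | nil => intro mv h; simpa [pvM] using h
  | cons x t ih =>
    intro mv h
    rw [pvM_cons]
    have := pvRk_le_three x
    exact ih _ (by omega)

theorem pvRk_eq_iff (x : String) :
    (pvRk x = 0 ↔ PySem.Str.lower x = "low") ∧
    (pvRk x = 1 ↔ PySem.Str.lower x = "medium") ∧
    (pvRk x = 2 ↔ PySem.Str.lower x = "high") ∧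
    (pvRk x = 3 ↔ PySem.Str.lower x = "critical") := by
  unfold pvRk
  split_ifs <;> simp_all

-- one level of B's scan, when the level 'name' (of rank r) is absent because all ranks are ≤ k < r
theorem pvFindName_none (s : List String) (k r : Int) (name : String)
    (hiff : ∀ x : String, pvRk x = r ↔ PySem.Str.lower x = name)
    (hmem : ∀ x ∈ s, pvRk x ≤ k) (hkr : k < r) :
    s.find? (fun x => PySem.Str.lower x == name) = none := by
  apply List.find?_eq_none.mpr
  intro x hx
  simp only [beq_iff_eq]
  intro hlow
  have := (hiff x).mpr hlow
  have := hmem x hx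
  omega

-- the level of rank k = pvM (-1) s (0 ≤ k) is present, and A's find? predicate coincides with B's there
theorem pvCaseHit (s : List String) (k : Int) (name : String)
    (hiff : ∀ x : String, pvRk x = k ↔ PySem.Str.lower x = name)
    (hmem : ∀ x ∈ s, pvRk x ≤ k) (hex : ∃ x ∈ s, pvRk x = k) (hk : 0 ≤ k) :
    (match s.find? (fun x => decide (-1 < pvRk x ∧ k ≤ pvRk x)) with
     | some y => y | none => "low")
      = (match s.find? (fun x => PySem.Str.lower x == name) with
         | some y => y | none => pvPickBRest) := by
  have hrw : s.find? (fun x => decide (-1 < pvRk x ∧ k ≤ pvRk x))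
      = s.find? (fun x => PySem.Str.lower x == name) := by
    apply pvFind?_ext
    intro x hx
    have h1 := hmem x hx
    have h2 := hiff x
    by_cases hl : PySem.Str.lower x = name
    · have h3 : pvRk x = k := h2.mpr hl
      have h4 : (PySem.Str.lower x == name) = true := by simp [hl]
      rw [h4]
      simp only [decide_eq_true_eq]
      omega
    · have h3 : pvRk x ≠ k := fun h => hl (h2.mp h)
      have h4 : (PySem.Str.lower x == name) = false := by simp [hl]
      rw [h4]
      simp only [decide_eq_false_iff_not]
      omega
  rw [hrw]
  obtain ⟨y, hy, hry⟩ := hex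
  cases hf : s.find? (fun x => PySem.Str.lower x == name) with
  | none =>
    exfalso
    have := List.find?_eq_none.mp hf y hy
    simp only [beq_iff_eq] at this
    exact this ((hiff y).mp hry)
  | some z => rfl

-- ===== VERDICT (by name: the statement is the Claim_ definition above) =====
theorem get_max_severity_py_spec : Claim_equal_get_max_severity_py := by
  unfold Claim_equal_get_max_severity_py Spec_get_max_severity_py
  intro s _
  -- rewrite A into its characterization
  have hA : get_max_severity_py s
      = (match s.find? (fun x => decide (-1 < pvRk x ∧ pvM (-1) s ≤ pvRk x)) with
         | some y => y | none => "low") := by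
    unfold get_max_severity_py
    simp only
    have hstep : (fun (st : String × Int) severity =>
        if st.2 < (((PySem.List.enumerate (["low", "medium", "high", "critical"] : List String) 0).foldl
            (fun d p => d.insert p.2 p.1) PySem.Dict.empty).getD (PySem.Str.lower severity) (-1))
        then (severity,
          (((PySem.List.enumerate (["low", "medium", "high", "critical"] : List String) 0).foldl
            (fun d p => d.insert p.2 p.1) PySem.Dict.empty).getD (PySem.Str.lower severity) (-1)))
        else st)
        = (fun (st : String × Int) x => if st.2 < pvRk x then (x, pvRk x) else st) := by
      funext st x
      rw [pvVal_eq]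
    rw [hstep, pvFoldA_char]
    cases s.find? (fun x => decide (-1 < pvRk x ∧ pvM (-1) s ≤ pvRk x)) <;> rfl
  -- unfold B into its four-level scan
  have hB : get_max_severity_py_alt s
      = (match s.find? (fun x => PySem.Str.lower x == "critical") with
         | some y => y
         | none =>
           match s.find? (fun x => PySem.Str.lower x == "high") with
           | some y => y
           | none =>
             match s.find? (fun x => PySem.Str.lower x == "medium") with
             | some y => y
             | none =>
               match s.find? (fun x => PySem.Str.lower x == "low") with
               | some y => y
               | none => "low") := by
    unfold get_max_severity_py_alt
    simp only
    rw [pvPickB_cons s (fun s => PySem.Str.lower s)]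
    cases s.find? (fun x => PySem.Str.lower x == "critical") with
    | some y => rfl
    | none =>
      rw [pvPickB_cons s (fun s => PySem.Str.lower s)]
      cases s.find? (fun x => PySem.Str.lower x == "high") with
      | some y => rfl
      | none =>
        rw [pvPickB_cons s (fun s => PySem.Str.lower s)]
        cases s.find? (fun x => PySem.Str.lower x == "medium") with
        | some y => rfl
        | none =>
          rw [pvPickB_cons s (fun s => PySem.Str.lower s)]
          cases s.find? (fun x => PySem.Str.lower x == "low") with
          | some y => rfl
          | none => rfl
  rw [hA, hB]
  have hmem := pvM_ge_mem s (-1)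
  have hlo : -1 ≤ pvM (-1) s := pvM_ge_init s (-1)
  have hhi : pvM (-1) s ≤ 3 := pvM_le_three s (-1) (by omega)
  have hex := pvM_exists s (-1)
  have h5 : pvM (-1) s = -1 ∨ pvM (-1) s = 0 ∨ pvM (-1) s = 1 ∨ pvM (-1) s = 2 ∨ pvM (-1) s = 3 := by
    omega
  rcases h5 with h|h|h|h|h <;> rw [h] at hmem hex ⊢
  · -- M = -1 : no known severity present
    have hnone : ∀ name r, (∀ x : String, pvRk x = r ↔ PySem.Str.lower x = name) → (-1 : Int) < r →
        s.find? (fun x => PySem.Str.lower x == name) = none := by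
      intro name r hiff hr
      exact pvFindName_none s (-1) r name hiff (fun x hx => hmem x hx) hr
    rw [hnone "critical" 3 (fun x => (pvRk_eq_iff x).2.2.2) (by omega),
        hnone "high" 2 (fun x => (pvRk_eq_iff x).2.2.1) (by omega),
        hnone "medium" 1 (fun x => (pvRk_eq_iff x).2.1) (by omega),
        hnone "low" 0 (fun x => (pvRk_eq_iff x).1) (by omega)]
    have : s.find? (fun x => decide (-1 < pvRk x ∧ -1 ≤ pvRk x)) = none := by
      apply List.find?_eq_none.mpr
      intro x hx
      have := hmem x hx
      simp only [decide_eq_true_eq]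
      omega
    rw [this]
  · -- M = 0
    rw [pvFindName_none s 0 3 "critical" (fun x => (pvRk_eq_iff x).2.2.2) hmem (by omega),
        pvFindName_none s 0 2 "high" (fun x => (pvRk_eq_iff x).2.2.1) hmem (by omega),
        pvFindName_none s 0 1 "medium" (fun x => (pvRk_eq_iff x).2.1) hmem (by omega)]
    exact pvCaseHit s 0 "low" (fun x => (pvRk_eq_iff x).1) hmem (hex (by omega)) (by omega)
  · -- M = 1
    rw [pvFindName_none s 1 3 "critical" (fun x => (pvRk_eq_iff x).2.2.2) hmem (by omega),
        pvFindName_none s 1 2 "high" (fun x => (pvRk_eq_iff x).2.2.1) hmem (by omega)]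
    exact pvCaseHit s 1 "medium" (fun x => (pvRk_eq_iff x).2.1) hmem (hex (by omega)) (by omega)
  · -- M = 2
    rw [pvFindName_none s 2 3 "critical" (fun x => (pvRk_eq_iff x).2.2.2) hmem (by omega)]
    exact pvCaseHit s 2 "high" (fun x => (pvRk_eq_iff x).2.2.1) hmem (hex (by omega)) (by omega)
  · -- M = 3
    exact pvCaseHit s 3 "critical" (fun x => (pvRk_eq_iff x).2.2.2) hmem (hex (by omega)) (by omega)
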